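-- pv_equiv track=rewrite | github.com/21wh1a0501/CROSSWORD | root.py | copymatrix1
-- ===== SOURCE A (Python) =====
-- def copymatrix1(r, c, puzzle):
--     copy = [[0 for _ in range(c)] for _ in range(r)]
--     start = 0
--     for i in range(r):
--         for j in range(c):
--             if puzzle[i][j] != '*' and (i == 0 or j == 0 or puzzle[i][j - 1] == '*' or puzzle[i - 1][j] == '*'):
--                 copy[i][j] = start + 1
--                 start += 1
--     return copy
-- ===== SOURCE B (Python) =====
-- def copymatrix1(r, c, puzzle):
--     # Closed-form numbering: a cell's clue number is the count of start cells up to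
--     # and including it in row-major order; no running counter, no mutation.
--     flags = [[puzzle[i][j] != '*' and (i == 0 or j == 0 or puzzle[i][j - 1] == '*'
--               or puzzle[i - 1][j] == '*') for j in range(c)] for i in range(r)]
--     row_tot = [sum(row) for row in flags]
--     return [[sum(row_tot[:i]) + sum(flags[i][:j + 1]) if flags[i][j] else 0
--              for j in range(c)] for i in range(r)]
-- ===== Notes on version B (the rewrite author's own statement) =====
-- stated objective: alternative
-- what changed: Replaces A's stateful counter scan that mutates a matrix in place with a closed-form prefix-count formula: a boolean start-flag grid is built once and each cell's number is computed directly as the count of start cells up to it (row totals above plus in-row prefix), with no counter and no mutation.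
import Mathlib
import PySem

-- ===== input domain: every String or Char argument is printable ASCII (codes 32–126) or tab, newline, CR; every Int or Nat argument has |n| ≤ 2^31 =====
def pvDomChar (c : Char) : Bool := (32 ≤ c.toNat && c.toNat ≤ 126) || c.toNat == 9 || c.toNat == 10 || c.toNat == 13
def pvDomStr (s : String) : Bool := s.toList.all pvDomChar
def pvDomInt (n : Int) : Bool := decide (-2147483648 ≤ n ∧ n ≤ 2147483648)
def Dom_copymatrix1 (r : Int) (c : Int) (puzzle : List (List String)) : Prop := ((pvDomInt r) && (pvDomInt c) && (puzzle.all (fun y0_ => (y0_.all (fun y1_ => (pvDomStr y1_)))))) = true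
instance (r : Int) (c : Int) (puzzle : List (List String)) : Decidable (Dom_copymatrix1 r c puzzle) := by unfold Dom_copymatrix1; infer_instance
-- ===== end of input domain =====

-- B replaces A's stateful counter scan mutating a matrix in place by a closed-form
-- prefix-count formula (each cell's number = count of start cells up to it); same
-- return value, no counter and no mutation.

-- helpers shared by both ports: cell read puzzle[i][j] (exact under Pre_) and Python's
-- start condition (short-circuit exact under Pre_)
def pvCell (puzzle : List (List String)) (i j : Int) : String :=
  PySem.List.pyGetD (PySem.List.pyGetD puzzle i []) j ""

def pvIsStart (puzzle : List (List String)) (i j : Int) : Bool :=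
  (!(pvCell puzzle i j == "*")) &&
    (i == 0 || j == 0 || pvCell puzzle i (j - 1) == "*" || pvCell puzzle (i - 1) j == "*")

-- ===== PORT A =====
-- the write copy[i][j] = v (A mutates its fresh matrix in place)
def pvSetCell (cp : List (List Int)) (i j v : Int) : List (List Int) :=
  PySem.List.pySetD cp i (PySem.List.pySetD (PySem.List.pyGetD cp i []) j v)

def copymatrix1 (r : Int) (c : Int) (puzzle : List (List String)) : List (List Int) :=
  let copy := (PySem.List.pyRange 0 r 1).map (fun _ => (PySem.List.pyRange 0 c 1).map (fun _ => (0 : Int)))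
  ((PySem.List.pyRange 0 r 1).foldl (fun st i =>
      (PySem.List.pyRange 0 c 1).foldl (fun st j =>
        if pvIsStart puzzle i j then (pvSetCell st.1 i j (st.2 + 1), st.2 + 1) else st) st)
    (copy, (0 : Int))).1

-- ===== PORT B =====
def copymatrix1_alt (r : Int) (c : Int) (puzzle : List (List String)) : List (List Int) :=
  let flags := (PySem.List.pyRange 0 r 1).map (fun i =>
    (PySem.List.pyRange 0 c 1).map (fun j => pvIsStart puzzle i j))
  let rowTot := flags.map (fun row => (row.map (fun b => if b then (1 : Int) else 0)).sum)
  (PySem.List.pyRange 0 r 1).map (fun i =>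
    (PySem.List.pyRange 0 c 1).map (fun j =>
      if PySem.List.pyGetD (PySem.List.pyGetD flags i []) j false then
        (PySem.List.slice rowTot none (some i)).sum +
          ((PySem.List.slice (PySem.List.pyGetD flags i []) none (some (j + 1))).map
            (fun b => if b then (1 : Int) else 0)).sum
      else 0))

-- ===== PRECONDITION & SPEC =====
-- Pre_: exactly where Python A returns — the body indexes puzzle only when both loops run,
-- so either a loop is empty, or the first r rows exist and each has at least c cells.
def Pre_copymatrix1 (r : Int) (c : Int) (puzzle : List (List String)) : Prop :=
  r ≤ 0 ∨ c ≤ 0 ∨ (r ≤ puzzle.length ∧ ∀ row ∈ puzzle.take r.toNat, c ≤ row.length)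
instance (r : Int) (c : Int) (puzzle : List (List String)) : Decidable (Pre_copymatrix1 r c puzzle) := by unfold Pre_copymatrix1; infer_instance

def pvWitness_copymatrix1 : Int × Int × List (List String) := (2, 2, [["a", "b"], ["*", "c"]])

def Spec_copymatrix1 (r : Int) (c : Int) (puzzle : List (List String)) (out : List (List Int)) : Prop := out = copymatrix1_alt r c puzzle
instance (r : Int) (c : Int) (puzzle : List (List String)) (out : List (List Int)) : Decidable (Spec_copymatrix1 r c puzzle out) := by unfold Spec_copymatrix1; infer_instance

-- ===== CLAIM (what is proved, stated in full; the proofs are below) =====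
def Claim_equal_copymatrix1 : Prop := ∀ (r : Int) (c : Int) (puzzle : List (List String)), Dom_copymatrix1 r c puzzle → Pre_copymatrix1 r c puzzle → Spec_copymatrix1 r c puzzle (copymatrix1 r c puzzle)

-- ===== LEMMAS AND PROOFS =====

-- reference numbering: consecutive numbers for the true flags, row by row
def pvRowSum (row : List Bool) : Int := (row.map (fun b => if b then (1 : Int) else 0)).sum

def pvNumRow : List Bool → Int → List Int
  | [], _ => []
  | b :: t, n => if b then (n + 1) :: pvNumRow t (n + 1) else 0 :: pvNumRow t n

def pvNumGrid : List (List Bool) → Int → List (List Int)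
  | [], _ => []
  | row :: t, n => pvNumRow row n :: pvNumGrid t (n + pvRowSum row)

-- the start-flag grid, indexed by Nat row/column
def pvFlagsN (r c : Int) (puzzle : List (List String)) : List (List Bool) :=
  (List.range r.toNat).map (fun i : Nat =>
    (List.range c.toNat).map (fun j : Nat => pvIsStart puzzle (i : Int) (j : Int)))

theorem pyRange01 (n : Int) :
    PySem.List.pyRange 0 n 1 = (List.range n.toNat).map (fun k : Nat => (k : Int)) := by
  by_cases h : 0 ≤ n
  · have h2 := PySem.List.pyRange_zero_natCast n.toNat
    rw [Int.toNat_of_nonneg h] at h2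
    exact h2
  · have h0 : (PySem.List.pyRange 0 n 1).length = 0 := by
      rw [PySem.List.length_pyRange_one]; omega
    have h1 : n.toNat = 0 := by omega
    simp [List.length_eq_zero_iff.mp h0, h1]

theorem length_pvNumRow (row : List Bool) (n : Int) : (pvNumRow row n).length = row.length := by
  induction row generalizing n with
  | nil => rfl
  | cons b t ih => by_cases hb : b <;> simp [pvNumRow, hb, ih]

theorem length_pvNumGrid (fs : List (List Bool)) (n : Int) : (pvNumGrid fs n).length = fs.length := by
  induction fs generalizing n with
  | nil => rfl
  | cons row t ih => simp [pvNumGrid, ih]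

theorem pvRowSum_cons (b : Bool) (l : List Bool) :
    pvRowSum (b :: l) = (if b then 1 else 0) + pvRowSum l := by
  simp [pvRowSum]

theorem pvNumRow_getD (row : List Bool) (n : Int) (j : Nat) (hj : j < row.length) :
    (pvNumRow row n).getD j 0 =
      if row.getD j false then n + pvRowSum (row.take (j + 1)) else 0 := by
  induction row generalizing n j with
  | nil => simp at hj
  | cons b t ih =>
      cases j with
      | zero =>
          cases b
          · rfl
          · simp [pvNumRow, pvRowSum]
      | succ j =>
          have hj' : j < t.length := by simpa using hj
          cases b
          · rw [show pvNumRow (false :: t) n = 0 :: pvNumRow t n from rfl,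
                List.getD_cons_succ, List.getD_cons_succ, List.take_succ_cons,
                pvRowSum_cons, ih _ _ hj']
            norm_num
          · rw [show pvNumRow (true :: t) n = (n + 1) :: pvNumRow t (n + 1) from rfl,
                List.getD_cons_succ, List.getD_cons_succ, List.take_succ_cons,
                pvRowSum_cons, ih _ _ hj']
            norm_num
            split_ifs with h
            · ring
            · rfl

theorem pvNumGrid_getD (fs : List (List Bool)) (n : Int) (i : Nat) (hi : i < fs.length) :
    (pvNumGrid fs n).getD i [] =
      pvNumRow (fs.getD i []) (n + (((fs.take i).map pvRowSum).sum)) := by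
  induction fs generalizing n i with
  | nil => simp at hi
  | cons row t ih =>
      cases i with
      | zero => simp [pvNumGrid]
      | succ i =>
          have hi' : i < t.length := by simpa using hi
          rw [show pvNumGrid (row :: t) n = pvNumRow row n :: pvNumGrid t (n + pvRowSum row) from rfl,
              List.getD_cons_succ, List.getD_cons_succ, ih _ _ hi', List.take_succ_cons,
              List.map_cons, List.sum_cons]
          congr 1
          ring

-- hoist the row write out of A's inner loop: only row i of the matrix changes
theorem foldl_set_row (f : Nat → Bool) (cols : List Nat) (i : Nat)
    (cp : List (List Int)) (n : Int) (hi : i < cp.length) :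
    cols.foldl (fun st j =>
        if f j then ((st.1.set i ((st.1.getD i []).set j (st.2 + 1))), st.2 + 1) else st) (cp, n)
    = (cp.set i ((cols.foldl (fun st j =>
          if f j then (st.1.set j (st.2 + 1), st.2 + 1) else st) (cp.getD i [], n)).1),
       (cols.foldl (fun st j =>
          if f j then (st.1.set j (st.2 + 1), st.2 + 1) else st) (cp.getD i [], n)).2) := by
  induction cols generalizing cp n with
  | nil =>
      simp only [List.foldl_nil]
      rw [List.getD_eq_getElem _ _ hi, List.set_getElem_self]
  | cons j tl ih =>
      by_cases hf : f j
      · simp only [List.foldl_cons, hf, if_pos]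
        rw [ih _ _ (by simpa using hi)]
        have hget : ((cp.set i ((cp.getD i []).set j (n + 1)))).getD i []
            = (cp.getD i []).set j (n + 1) := by
          rw [List.getD_eq_getElem _ _ (by simpa using hi)]
          exact List.getElem_set_self (by simpa using hi)
        rw [hget, List.set_set]
      · simp only [List.foldl_cons, hf, Bool.false_eq_true, if_neg, not_false_iff]
        exact ih _ _ hi

-- A's inner loop on an all-zero suffix of the row produces the reference numbering
theorem rowfold (f : Nat → Bool) : ∀ (len k : Nat) (pre : List Int) (n : Int),
    pre.length = k →
    (List.range' k len).foldl (fun st j =>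
        if f j then (st.1.set j (st.2 + 1), st.2 + 1) else st) (pre ++ List.replicate len 0, n)
    = (pre ++ pvNumRow ((List.range' k len).map f) n,
       n + pvRowSum ((List.range' k len).map f)) := by
  intro len
  induction len with
  | zero => intro k pre n _; simp [pvNumRow, pvRowSum]
  | succ len ih =>
      intro k pre n hk
      rw [List.range'_succ, List.replicate_succ, List.foldl_cons, List.map_cons, pvRowSum_cons]
      by_cases hf : f k
      · simp only [hf, if_pos]
        have hset : (pre ++ (0 : Int) :: List.replicate len 0).set k (n + 1)
            = (pre ++ [n + 1]) ++ List.replicate len 0 := by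
          rw [List.set_append]
          simp [hk]
        rw [hset, ih (k + 1) (pre ++ [n + 1]) (n + 1) (by simp [hk]),
            show pvNumRow (true :: (List.range' (k + 1) len).map f) n
              = (n + 1) :: pvNumRow ((List.range' (k + 1) len).map f) (n + 1) from rfl]
        refine Prod.ext ?_ ?_
        · simp
        · simp; ring
      · simp only [hf, Bool.false_eq_true, if_neg, not_false_iff]
        have hrep : pre ++ (0 : Int) :: List.replicate len 0
            = (pre ++ [0]) ++ List.replicate len 0 := by simp
        rw [hrep, ih (k + 1) (pre ++ [0]) n (by simp [hk]),
            show pvNumRow (false :: (List.range' (k + 1) len).map f) n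
              = 0 :: pvNumRow ((List.range' (k + 1) len).map f) n from rfl]
        refine Prod.ext ?_ ?_
        · simp
        · simp

-- A's inner loop on a fresh all-zero row, packaged for the outer induction
theorem rowfold0 (f : Nat → Bool) (C : Nat) (n : Int) :
    (List.range C).foldl (fun st j =>
        if f j then (st.1.set j (st.2 + 1), st.2 + 1) else st) (List.replicate C 0, n)
    = (pvNumRow ((List.range C).map f) n, n + pvRowSum ((List.range C).map f)) := by
  have h := rowfold f C 0 [] n rfl
  simpa [List.range_eq_range'] using h

-- A's outer loop over untouched all-zero rows produces the reference grid
theorem gridfold (g : Nat → Nat → Bool) (C : Nat) : ∀ (len k : Nat) (pre : List (List Int)) (n : Int),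
    pre.length = k →
    (List.range' k len).foldl (fun st i =>
        (List.range C).foldl (fun st j =>
          if g i j then ((st.1.set i ((st.1.getD i []).set j (st.2 + 1))), st.2 + 1) else st) st)
      (pre ++ List.replicate len (List.replicate C (0 : Int)), n)
    = (pre ++ pvNumGrid ((List.range' k len).map (fun i => (List.range C).map (g i))) n,
       n + (((List.range' k len).map (fun i => pvRowSum ((List.range C).map (g i)))).sum)) := by
  intro len
  induction len with
  | zero => intro k pre n _; simp [pvNumGrid]
  | succ len ih =>
      intro k pre n hk
      rw [List.range'_succ, List.replicate_succ, List.foldl_cons]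
      have hlen : k < (pre ++ List.replicate C (0:Int) :: List.replicate len (List.replicate C (0:Int))).length := by
        simp [hk]
      rw [foldl_set_row (g k) _ k _ n hlen]
      have hrow : (pre ++ List.replicate C (0:Int) :: List.replicate len (List.replicate C (0:Int))).getD k []
          = List.replicate C (0 : Int) := by
        rw [List.getD_eq_getElem _ _ hlen, List.getElem_append_right (by omega)]
        simp [hk]
      rw [hrow, rowfold0 (g k) C n]
      have hset : (pre ++ List.replicate C (0:Int) :: List.replicate len (List.replicate C (0:Int))).set k
            (pvNumRow ((List.range C).map (g k)) n)
          = (pre ++ [pvNumRow ((List.range C).map (g k)) n]) ++ List.replicate len (List.replicate C (0:Int)) := by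
        rw [List.set_append]
        simp [hk]
      rw [hset, ih (k + 1) _ _ (by simp [hk])]
      rw [List.map_cons,
          show pvNumGrid (((List.range C).map (g k)) :: (List.range' (k + 1) len).map (fun i => (List.range C).map (g i))) n
            = pvNumRow ((List.range C).map (g k)) n
              :: pvNumGrid ((List.range' (k + 1) len).map (fun i => (List.range C).map (g i))) (n + pvRowSum ((List.range C).map (g k))) from rfl,
          List.map_cons, List.sum_cons]
      refine Prod.ext ?_ ?_
      · simp
      · simp; ring

-- B's formula matrix is the reference grid
theorem alt_eq_numGrid (r c : Int) (puzzle : List (List String)) :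
    copymatrix1_alt r c puzzle = pvNumGrid (pvFlagsN r c puzzle) 0 := by
  unfold copymatrix1_alt pvFlagsN
  rw [pyRange01 r, pyRange01 c]
  have hflags : (((List.range r.toNat).map (fun k : Nat => (k : Int))).map (fun i =>
        ((List.range c.toNat).map (fun k : Nat => (k : Int))).map (fun j => pvIsStart puzzle i j)))
      = (List.range r.toNat).map (fun i : Nat =>
          (List.range c.toNat).map (fun j : Nat => pvIsStart puzzle (i : Int) (j : Int))) := by
    simp only [List.map_map]
    rfl
  rw [hflags]
  apply List.ext_getElem
  · simp [length_pvNumGrid]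
  · intro i h1 h2
    have hiR : i < r.toNat := by simpa using h1
    simp only [List.getElem_map, List.getElem_range]
    rw [← List.getD_eq_getElem _ ([] : List Int) h2,
        pvNumGrid_getD _ _ _ (by simpa using hiR),
        PySem.List.getD_map_range _ _ _ _ hiR,
        PySem.List.pyGetD_natCast, PySem.List.getD_map_range _ _ _ _ hiR,
        PySem.List.slice_to_natCast]
    apply List.ext_getElem
    · simp [length_pvNumRow]
    · intro j hj1 hj2
      have hjC : j < c.toNat := by simpa using hj1
      simp only [List.getElem_map, List.getElem_range]
      rw [← List.getD_eq_getElem _ (0 : Int) hj2,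
          pvNumRow_getD _ _ _ (by simpa using hjC),
          PySem.List.pyGetD_natCast, PySem.List.getD_map_range _ _ _ _ hjC,
          show ((j : Int) + 1) = (((j + 1 : Nat) : Int)) by push_cast; ring,
          PySem.List.slice_to_natCast, ← List.map_take]
      simp only [pvRowSum]
      split_ifs
      · rw [zero_add]
        rfl
      · rfl

-- A's in-place scan is the reference grid
theorem a_eq_numGrid (r c : Int) (puzzle : List (List String)) :
    copymatrix1 r c puzzle = pvNumGrid (pvFlagsN r c puzzle) 0 := by
  unfold copymatrix1 pvFlagsN
  rw [pyRange01 r, pyRange01 c]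
  have h := gridfold (fun i j => pvIsStart puzzle (i : Int) (j : Int)) c.toNat r.toNat 0 [] 0 rfl
  rw [← List.range_eq_range'] at h
  simp only [List.nil_append] at h
  simp only [List.foldl_map, pvSetCell, PySem.List.pySetD_natCast, PySem.List.pyGetD_natCast,
    List.map_const', List.length_map, List.length_range]
  rw [h]

-- ===== VERDICT (by name: the statement is the Claim_ definition above) =====
theorem copymatrix1_spec : Claim_equal_copymatrix1 := by
  intro r c puzzle _ _
  unfold Spec_copymatrix1
  rw [a_eq_numGrid, alt_eq_numGrid]
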